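-- pv_equiv track=rewrite | github.com/harshitrajchaurasia/pii-shield | src/pi_remover/remover.py | _redact_by_positions
-- ===== SOURCE A (Python) =====
-- from typing import List, Dict, Tuple, Optional, Any
--
-- def _redact_by_positions(text: str, positions: List[Tuple[int, int, str]]) -> str:
--     """Redact text at given positions using O(N) join pattern."""
--     if not positions:
--         return text
--     # Sort by start position ascending for forward iteration
--     sorted_pos = sorted(positions, key=lambda x: x[0])
--     text_len = len(text)
--     parts = []
--     last_end = 0
--     for start, end, replacement in sorted_pos:
--         if start < 0 or end > text_len or start >= end or start < last_end:
--             continue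
--         parts.append(text[last_end:start])
--         parts.append(replacement)
--         last_end = end
--     parts.append(text[last_end:])
--     return ''.join(parts)
-- ===== SOURCE B (Python) =====
-- from typing import List, Tuple
--
-- def _redact_by_positions(text: str, positions: List[Tuple[int, int, str]]) -> str:
--     """Select the valid non-overlapping spans first, then apply them to the
--     text back-to-front with slice surgery so edits never shift later indices."""
--     if not positions:
--         return text
--     n = len(text)
--     accepted = []
--     last_end = 0
--     for start, end, replacement in sorted(positions, key=lambda x: x[0]):
--         if start < 0 or end > n or start >= end or start < last_end:
--             continue
--         accepted.append((start, end, replacement))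
--         last_end = end
--     result = text
--     for start, end, replacement in reversed(accepted):
--         result = result[:start] + replacement + result[end:]
--     return result
-- ===== Notes on version B (the rewrite author's own statement) =====
-- stated objective: alternative
-- what changed: A makes one pass that interleaves span filtering with building a parts list joined at the end; B first selects the accepted spans, then applies them to the text back-to-front with slice surgery (result = result[:start] + replacement + result[end:]) so earlier edits never shift later indices.
import Mathlib
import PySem

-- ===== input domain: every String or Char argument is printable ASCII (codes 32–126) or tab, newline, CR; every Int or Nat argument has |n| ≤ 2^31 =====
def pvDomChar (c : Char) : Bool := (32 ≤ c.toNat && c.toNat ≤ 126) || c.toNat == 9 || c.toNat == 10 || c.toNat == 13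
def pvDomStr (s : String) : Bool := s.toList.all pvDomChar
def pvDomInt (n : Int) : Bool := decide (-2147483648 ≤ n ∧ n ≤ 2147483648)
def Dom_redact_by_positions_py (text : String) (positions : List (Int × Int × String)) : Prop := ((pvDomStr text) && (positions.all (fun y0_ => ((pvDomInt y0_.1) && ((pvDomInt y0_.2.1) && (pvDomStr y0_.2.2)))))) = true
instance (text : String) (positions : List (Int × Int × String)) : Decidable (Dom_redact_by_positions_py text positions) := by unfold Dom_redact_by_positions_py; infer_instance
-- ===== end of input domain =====

-- B changes the decomposition (same output, same cost): select the accepted spans first, then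
-- apply them back-to-front by slice surgery, instead of A's single pass building a parts list.

-- ===== PORT A =====
-- Literal port of A: sort by start, one fold building (parts, last_end), then ''.join(parts).
def redact_by_positions_py (text : String) (positions : List (Int × Int × String)) : String :=
  if positions = [] then text
  else
    let sorted_pos := PySem.List.sorted positions (fun x => x.1)
    let text_len := PySem.Str.len text
    let st := sorted_pos.foldl (fun (st : List String × Int) x =>
      if x.1 < 0 ∨ text_len < x.2.1 ∨ x.2.1 ≤ x.1 ∨ x.1 < st.2 then st
      else (st.1 ++ [PySem.Str.slice text (some st.2) (some x.1), x.2.2], x.2.1)) ([], 0)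
    PySem.Str.join "" (st.1 ++ [PySem.Str.slice text (some st.2) none])

-- ===== PORT B =====
-- B's phase 1: the selection loop (last_end threaded through) collecting the accepted spans.
def pvSelect (text_len : Int) : Int → List (Int × Int × String) → List (Int × Int × String)
  | _, [] => []
  | last_end, x :: ps =>
    if x.1 < 0 ∨ text_len < x.2.1 ∨ x.2.1 ≤ x.1 ∨ x.1 < last_end then
      pvSelect text_len last_end ps
    else
      x :: pvSelect text_len x.2.1 ps

-- B's phase 2: apply the accepted spans in reverse order via result = result[:s] + r + result[e:].
def redact_by_positions_py_alt (text : String) (positions : List (Int × Int × String)) : String :=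
  if positions = [] then text
  else
    let accepted := pvSelect (PySem.Str.len text) 0 (PySem.List.sorted positions (fun x => x.1))
    accepted.foldr (fun x result =>
      PySem.Str.slice result none (some x.1) ++ x.2.2 ++ PySem.Str.slice result (some x.2.1) none) text

-- ===== PRECONDITION & SPEC =====
def Spec_redact_by_positions_py (text : String) (positions : List (Int × Int × String)) (out : String) : Prop := out = redact_by_positions_py_alt text positions
instance (text : String) (positions : List (Int × Int × String)) (out : String) : Decidable (Spec_redact_by_positions_py text positions out) := by unfold Spec_redact_by_positions_py; infer_instance

-- ===== CLAIM (what is proved, stated in full; the proofs are below) =====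
def Claim_equal_redact_by_positions_py : Prop := ∀ (text : String) (positions : List (Int × Int × String)), Dom_redact_by_positions_py text positions → Spec_redact_by_positions_py text positions (redact_by_positions_py text positions)

-- ===== LEMMAS AND PROOFS =====

-- ''.join over lists of chars is flatten.
theorem pv_join_nil_flatten (xss : List (List Char)) : PySem.Chars.join [] xss = xss.flatten := by
  induction xss with
  | nil => simp [PySem.Chars.join_nil]
  | cons x xs ih =>
    cases xs with
    | nil => simp [PySem.Chars.join_singleton]
    | cons y ys => rw [PySem.Chars.join_cons_cons, ih]; simp

-- The rendered output of A's filtering pass, char-level, parametrised by the guard bound n.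
def pvR (t : List Char) (n : Int) : Int → List (Int × Int × String) → List Char
  | le, [] => t.drop le.toNat
  | le, x :: ps =>
    if x.1 < 0 ∨ n < x.2.1 ∨ x.2.1 ≤ x.1 ∨ x.1 < le then pvR t n le ps
    else (t.drop le.toNat).take (x.1.toNat - le.toNat) ++ x.2.2.toList ++ pvR t n x.2.1 ps

-- Rendering an already-selected span list.
def pvRsel (t : List Char) : Int → List (Int × Int × String) → List Char
  | le, [] => t.drop le.toNat
  | le, x :: L =>
    (t.drop le.toNat).take (x.1.toNat - le.toNat) ++ x.2.2.toList ++ pvRsel t x.2.1 L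

-- Accepted spans are chained: each starts at or after last_end, is nonempty, ends within n.
def pvChain (n : Int) : Int → List (Int × Int × String) → Prop
  | _, [] => True
  | le, x :: L => le ≤ x.1 ∧ x.1 < x.2.1 ∧ x.2.1 ≤ n ∧ pvChain n x.2.1 L

theorem pvSelect_chain (n : Int) (ps : List (Int × Int × String)) (le : Int) :
    pvChain n le (pvSelect n le ps) := by
  induction ps generalizing le with
  | nil => exact trivial
  | cons x ps ih =>
    by_cases h : x.1 < 0 ∨ n < x.2.1 ∨ x.2.1 ≤ x.1 ∨ x.1 < le
    · rw [pvSelect, if_pos h]; exact ih le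
    · rw [pvSelect, if_neg h]
      push Not at h
      exact ⟨by omega, by omega, by omega, ih x.2.1⟩

theorem pvR_eq_pvRsel_pvSelect (t : List Char) (n : Int) (ps : List (Int × Int × String)) (le : Int) :
    pvR t n le ps = pvRsel t le (pvSelect n le ps) := by
  induction ps generalizing le with
  | nil => rfl
  | cons x ps ih =>
    by_cases h : x.1 < 0 ∨ n < x.2.1 ∨ x.2.1 ≤ x.1 ∨ x.1 < le
    · rw [pvR, if_pos h, pvSelect, if_pos h, ih le]
    · rw [pvR, if_neg h, pvSelect, if_neg h, pvRsel, ih x.2.1]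

-- A's fold with a seed (acc, le) renders acc followed by pvR from le.
theorem pvA_fold (text : String) (n : Int) (ps : List (Int × Int × String)) (acc : List String)
    (le : Int) (hle : 0 ≤ le) :
    (((ps.foldl (fun (st : List String × Int) x =>
        if x.1 < 0 ∨ n < x.2.1 ∨ x.2.1 ≤ x.1 ∨ x.1 < st.2 then st
        else (st.1 ++ [PySem.Str.slice text (some st.2) (some x.1), x.2.2], x.2.1)) (acc, le)).1
      ++ [PySem.Str.slice text (some (ps.foldl (fun (st : List String × Int) x =>
        if x.1 < 0 ∨ n < x.2.1 ∨ x.2.1 ≤ x.1 ∨ x.1 < st.2 then st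
        else (st.1 ++ [PySem.Str.slice text (some st.2) (some x.1), x.2.2], x.2.1)) (acc, le)).2) none]).map String.toList).flatten
    = (acc.map String.toList).flatten ++ pvR text.toList n le ps := by
  induction ps generalizing acc le with
  | nil =>
    simp only [List.foldl_nil, List.map_append, List.map_cons, List.map_nil, List.flatten_append,
      List.flatten_cons, List.flatten_nil, List.append_nil, pvR]
    rw [PySem.Str.toList_slice, PySem.Chars.slice_eq_listSlice, PySem.List.slice_from _ hle]
  | cons x ps ih =>
    rw [List.foldl_cons]
    by_cases h : x.1 < 0 ∨ n < x.2.1 ∨ x.2.1 ≤ x.1 ∨ x.1 < le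
    · rw [if_pos h, ih acc le hle, pvR, if_pos h]
    · have h' : ¬(x.1 < 0 ∨ n < x.2.1 ∨ x.2.1 ≤ x.1 ∨ x.1 < le) := h
      push Not at h
      obtain ⟨h1, _, _, h4⟩ := h
      have hx2 : (0:Int) ≤ x.2.1 := by omega
      rw [if_neg h', ih (acc ++ [PySem.Str.slice text (some le) (some x.1), x.2.2]) x.2.1 hx2,
        pvR, if_neg h']
      simp only [List.map_append, List.map_cons, List.map_nil, List.flatten_append,
        List.flatten_cons, List.flatten_nil, List.append_nil]
      rw [PySem.Str.toList_slice, PySem.Chars.slice_eq_listSlice,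
        PySem.List.slice_toNat _ hle h1]
      simp [List.append_assoc]

-- toList of B's phase-2 foldr, pushed down to char-level slices.
theorem pvB_foldr_toList (L : List (Int × Int × String)) (s : String) :
    (L.foldr (fun x result =>
        PySem.Str.slice result none (some x.1) ++ x.2.2 ++ PySem.Str.slice result (some x.2.1) none) s).toList
    = L.foldr (fun x cs =>
        PySem.List.slice cs none (some x.1) ++ x.2.2.toList ++ PySem.List.slice cs (some x.2.1) none) s.toList := by
  induction L with
  | nil => rfl
  | cons x L ih =>
    simp only [List.foldr_cons, String.toList_append, PySem.Str.toList_slice,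
      PySem.Chars.slice_eq_listSlice, ih]

-- Applying a chained span list back-to-front leaves the prefix before le intact and renders the rest.
theorem pvB_apply (t : List Char) (L : List (Int × Int × String)) (le : Int)
    (hle : 0 ≤ le) (hch : pvChain (t.length : Int) le L) :
    (L.foldr (fun x cs =>
        PySem.List.slice cs none (some x.1) ++ x.2.2.toList ++ PySem.List.slice cs (some x.2.1) none) t)
    = t.take le.toNat ++ pvRsel t le L := by
  induction L generalizing le with
  | nil => simp [pvRsel]
  | cons x L ih =>
    obtain ⟨h1, h2, h3, hch2⟩ := hch
    have hx1 : (0:Int) ≤ x.1 := by omega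
    have hx2 : (0:Int) ≤ x.2.1 := by omega
    have he_len : x.2.1.toNat ≤ t.length := by omega
    rw [List.foldr_cons, ih x.2.1 hx2 hch2]
    rw [PySem.List.slice_to _ hx1, PySem.List.slice_from _ hx2]
    have htake_len : (t.take x.2.1.toNat).length = x.2.1.toNat := by
      simp [List.length_take, Nat.min_eq_left he_len]
    rw [List.take_append_of_le_length (by rw [htake_len]; omega)]
    rw [List.take_take, Nat.min_eq_left (by omega)]
    have hsplit : t.take x.1.toNat = t.take le.toNat ++ (t.drop le.toNat).take (x.1.toNat - le.toNat) := by
      rw [← List.take_add]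
      congr 1
      omega
    rw [hsplit]
    have hdrop : ((t.take x.2.1.toNat ++ pvRsel t x.2.1 L).drop x.2.1.toNat) = pvRsel t x.2.1 L := by
      exact List.drop_left' htake_len
    rw [hdrop, pvRsel]
    simp [List.append_assoc]

-- ===== VERDICT (by name: the statement is the Claim_ definition above) =====
theorem redact_by_positions_py_spec : Claim_equal_redact_by_positions_py := by
  intro text positions _
  unfold Spec_redact_by_positions_py redact_by_positions_py redact_by_positions_py_alt
  by_cases hemp : positions = []
  · simp [hemp]
  · simp only [hemp, if_false]
    apply String.toList_inj.mp
    rw [PySem.Str.toList_join]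
    rw [show ("" : String).toList = ([] : List Char) from rfl]
    rw [pv_join_nil_flatten]
    rw [pvA_fold text (PySem.Str.len text) (PySem.List.sorted positions (fun x => x.1)) [] 0 (le_refl 0)]
    rw [pvB_foldr_toList]
    have hch : pvChain ((text.toList.length : Nat) : Int) 0
        (pvSelect (PySem.Str.len text) 0 (PySem.List.sorted positions (fun x => x.1))) := by
      have := pvSelect_chain (PySem.Str.len text) (PySem.List.sorted positions (fun x => x.1)) 0
      rwa [PySem.Str.len_eq] at this
    rw [pvB_apply text.toList _ 0 (le_refl 0) hch]
    rw [← pvR_eq_pvRsel_pvSelect]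
    simp
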